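-- pv_equiv track=rewrite | github.com/onefastsnail/advent-of-code | 2015/solutions/day1/solution.py | part_2
-- ===== SOURCE A (Python) =====
-- def part_2(raw_input: str) -> int:
--     current_level = 0
--
--     for i, it in enumerate(raw_input):
--         next_level = current_level - 1 if it == ")" else current_level + 1
--
--         if next_level == -1:
--             return i + 1
--
--         current_level = next_level
--
--     return 0
-- ===== SOURCE B (Python) =====
-- def part_2(raw_input: str) -> int:
--     # The level before index p equals p - 2*(number of ')' before p), since every
--     # non-')' char counts as an open.  So the first crossing to -1 is the first ')'
--     # whose index p satisfies p == 2 * closes, where closes is its rank among ')'.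
--     close_positions = [i for i, c in enumerate(raw_input) if c == ")"]
--     for closes, p in enumerate(close_positions):
--         if p == 2 * closes:
--             return p + 1
--     return 0
-- ===== Notes on version B (the rewrite author's own statement) =====
-- stated objective: alternative
-- what changed: Drops A's running parenthesis level entirely: B first builds the table of closing-parenthesis positions with a comprehension, then returns the first position p equal to twice its rank (an arithmetic characterization of the level reaching -1), instead of updating and testing a level counter at every character.
import Mathlib
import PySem

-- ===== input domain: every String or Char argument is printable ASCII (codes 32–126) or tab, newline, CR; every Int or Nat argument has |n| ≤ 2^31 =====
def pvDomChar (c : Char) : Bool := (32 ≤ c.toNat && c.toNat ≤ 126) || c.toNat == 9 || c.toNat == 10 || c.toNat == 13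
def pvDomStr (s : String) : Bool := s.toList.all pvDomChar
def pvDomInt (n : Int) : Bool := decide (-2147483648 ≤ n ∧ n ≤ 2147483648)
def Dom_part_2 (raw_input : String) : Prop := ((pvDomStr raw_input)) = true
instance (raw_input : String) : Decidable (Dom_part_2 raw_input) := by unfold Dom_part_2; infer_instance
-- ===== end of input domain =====

-- B replaces A's running-level scan by an arithmetic characterization: build the table of
-- closing-parenthesis positions, then return the first whose index p equals twice its rank; objective: alternative.

-- ===== PORT A =====
-- A's for-loop with early return: carry the enumerate index i and current_level.
def part2Loop (cs : List Char) (i : Int) (current_level : Int) : Int :=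
  match cs with
  | [] => 0
  | it :: rest =>
    let next_level := if it = ')' then current_level - 1 else current_level + 1
    if next_level = -1 then i + 1
    else part2Loop rest (i + 1) next_level

def part_2 (raw_input : String) : Int := part2Loop raw_input.toList 0 0

-- ===== PORT B =====
-- [i for i, c in enumerate(raw_input) if c == ')'] : the indices of the ')' characters.
def closePos (cs : List Char) (i : Int) : List Int :=
  match cs with
  | [] => []
  | c :: rest => if c = ')' then i :: closePos rest (i + 1) else closePos rest (i + 1)

-- for closes, p in enumerate(close_positions): if p == 2*closes: return p + 1 / return 0
def altGo (ps : List Int) (closes : Int) : Int :=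
  match ps with
  | [] => 0
  | p :: rest => if p = 2 * closes then p + 1 else altGo rest (closes + 1)

def part_2_alt (raw_input : String) : Int := altGo (closePos raw_input.toList 0) 0

-- ===== PRECONDITION & SPEC =====
def Spec_part_2 (raw_input : String) (out : Int) : Prop := out = part_2_alt raw_input
instance (raw_input : String) (out : Int) : Decidable (Spec_part_2 raw_input out) := by unfold Spec_part_2; infer_instance

-- ===== CLAIM (what is proved, stated in full; the proofs are below) =====
def Claim_equal_part_2 : Prop := ∀ (raw_input : String), Dom_part_2 raw_input → Spec_part_2 raw_input (part_2 raw_input)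

-- ===== LEMMAS AND PROOFS =====

-- Invariant: when A's loop sits at index i with level lvl after having passed `closes`
-- many ')', we have i = lvl + 2*closes; under it both sides agree.
theorem part2Loop_eq_altGo (cs : List Char) :
    ∀ (i lvl closes : Int), i = lvl + 2 * closes → 0 ≤ lvl →
      part2Loop cs i lvl = altGo (closePos cs i) closes := by
  induction cs with
  | nil => intro i lvl closes _ _; simp [part2Loop, closePos, altGo]
  | cons c rest ih =>
    intro i lvl closes hinv hlvl
    by_cases hc : c = ')'
    · subst hc
      simp only [part2Loop, closePos, altGo, if_true]
      by_cases h0 : lvl = 0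
      · have h1 : lvl - 1 = -1 := by omega
        rw [if_pos h1, if_pos (by omega)]
      · rw [if_neg (by omega), if_neg (by omega)]
        exact ih (i + 1) (lvl - 1) (closes + 1) (by omega) (by omega)
    · simp only [part2Loop, closePos, if_neg hc]
      rw [if_neg (by omega)]
      exact ih (i + 1) (lvl + 1) closes (by omega) (by omega)

-- ===== VERDICT (by name: the statement is the Claim_ definition above) =====
theorem part_2_spec : Claim_equal_part_2 := by
  intro s _
  unfold Spec_part_2 part_2 part_2_alt
  exact part2Loop_eq_altGo s.toList 0 0 0 (by omega) (by omega)
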